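-- pv_equiv track=rewrite | github.com/too2/TrajPreprcess | utils.py | filter_adjacent_redundant_index
-- ===== SOURCE A (Python) =====
-- def filter_adjacent_redundant_index(coordinates):
--     res_index = []
--     pre = [coordinates[0]] + coordinates[:-1]
--     for i, item in enumerate(coordinates):
--         if item != pre[i]:
--             res_index.append(i - 1)
--     res_index.append(len(coordinates) - 1)
--     return res_index
-- ===== SOURCE B (Python) =====
-- def filter_adjacent_redundant_index(coordinates):
--     # Two-pointer run scan: for each maximal run of equal values, record the
--     # index of its last element.  Returns [] on empty input (where the
--     # original raises IndexError).
--     res = []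
--     i = 0
--     n = len(coordinates)
--     while i < n:
--         j = i + 1
--         while j < n and coordinates[j] == coordinates[i]:
--             j += 1
--         res.append(j - 1)
--         i = j
--     return res
-- ===== Notes on version B (the rewrite author's own statement) =====
-- stated objective: alternative
-- what changed: Replaces the shifted-copy adjacent comparison (building pre = [c[0]]+c[:-1], comparing element-wise, appending i-1 plus a final last index) with a two-pointer scan over maximal runs of equal values that emits each run's last index directly; no shifted list and no separate final append.
-- outside the precondition, e.g. on filter_adjacent_redundant_index([]): A raises IndexError, B returns []
import Mathlib
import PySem

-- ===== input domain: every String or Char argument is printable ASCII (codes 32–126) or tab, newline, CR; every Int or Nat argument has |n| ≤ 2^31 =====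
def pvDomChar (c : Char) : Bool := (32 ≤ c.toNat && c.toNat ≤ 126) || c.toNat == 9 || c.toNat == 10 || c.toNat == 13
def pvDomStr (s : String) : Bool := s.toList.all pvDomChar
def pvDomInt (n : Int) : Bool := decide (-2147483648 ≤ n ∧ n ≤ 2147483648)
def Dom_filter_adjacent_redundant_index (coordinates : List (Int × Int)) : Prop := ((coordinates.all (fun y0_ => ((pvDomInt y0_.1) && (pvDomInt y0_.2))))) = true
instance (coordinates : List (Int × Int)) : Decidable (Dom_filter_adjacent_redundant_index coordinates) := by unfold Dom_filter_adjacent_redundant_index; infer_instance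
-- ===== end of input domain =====

-- B replaces A's shifted-copy adjacent comparison with a two-pointer scan over
-- maximal runs of equal values (alternative decomposition, same return value;
-- on the empty list A raises IndexError while B returns []).

-- ===== PORT A =====
-- A: pre = [coordinates[0]] + coordinates[:-1]; for i, item in enumerate(coordinates):
--    if item != pre[i]: res.append(i-1); then append len(coordinates)-1.
-- pre[i] is ported with pyGetD: i is always in range for pre (same length as coordinates).
def filter_adjacent_redundant_index (coordinates : List (Int × Int)) : List Int :=
  match coordinates with
  | [] => []   -- Python raises IndexError on coordinates[0]; excluded by Pre_
  | c0 :: _ =>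
    let pre := [c0] ++ PySem.List.slice coordinates none (some (-1))
    let res := (PySem.List.enumerate coordinates).foldl
      (fun acc p => if p.2 ≠ PySem.List.pyGetD pre p.1 (0, 0) then acc ++ [p.1 - 1] else acc) []
    res ++ [(coordinates.length : Int) - 1]

-- ===== PORT B =====
-- inner while loop 'j = i+1; while j < n and coordinates[j] == coordinates[i]: j += 1':
-- j - i - 1 is the count of leading elements of the remaining suffix equal to its head.
def pvRunLen (v : Int × Int) : List (Int × Int) → Nat
  | [] => 0
  | x :: xs => if x = v then pvRunLen v xs + 1 else 0

-- outer while loop 'while i < n', recursing on the suffix from i; the fuel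
-- argument (instantiated with the list length, consumed once per run) only
-- makes the recursion structural and never runs out.
def pvGoB : Nat → List (Int × Int) → Int → List Int
  | 0, _, _ => []
  | _ + 1, [], _ => []
  | fuel + 1, x :: xs, idx =>
    (idx + (pvRunLen x xs : Int)) :: pvGoB fuel (xs.drop (pvRunLen x xs)) (idx + (pvRunLen x xs : Int) + 1)

def filter_adjacent_redundant_index_alt (coordinates : List (Int × Int)) : List Int :=
  pvGoB coordinates.length coordinates 0

-- ===== PRECONDITION & SPEC =====
-- Pre_ excludes only the empty list, on which Python A raises IndexError
-- (coordinates[0]); B naturally returns [] there.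
def Pre_filter_adjacent_redundant_index (coordinates : List (Int × Int)) : Prop :=
  coordinates ≠ []
instance (coordinates : List (Int × Int)) : Decidable (Pre_filter_adjacent_redundant_index coordinates) := by unfold Pre_filter_adjacent_redundant_index; infer_instance

def pvWitness_filter_adjacent_redundant_index : (List (Int × Int)) := [(1, 2), (1, 2), (3, 4)]

def Spec_filter_adjacent_redundant_index (coordinates : List (Int × Int)) (out : List Int) : Prop := out = filter_adjacent_redundant_index_alt coordinates
instance (coordinates : List (Int × Int)) (out : List Int) : Decidable (Spec_filter_adjacent_redundant_index coordinates out) := by unfold Spec_filter_adjacent_redundant_index; infer_instance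

-- ===== CLAIM (what is proved, stated in full; the proofs are below) =====
def Claim_equal_filter_adjacent_redundant_index : Prop := ∀ (coordinates : List (Int × Int)), Dom_filter_adjacent_redundant_index coordinates → Pre_filter_adjacent_redundant_index coordinates → Spec_filter_adjacent_redundant_index coordinates (filter_adjacent_redundant_index coordinates)

-- ===== LEMMAS AND PROOFS =====

-- 'pvChg prev l i': the change indices A's loop appends while scanning l,
-- prev being the value before l's head and i the Python index of l's head.
def pvChg : (Int × Int) → List (Int × Int) → Int → List Int
  | _, [], _ => []
  | prev, x :: xs, i => (if x ≠ prev then [i - 1] else []) ++ pvChg x xs (i + 1)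

theorem pvGoB_nil (f : Nat) (idx : Int) : pvGoB f [] idx = [] := by
  cases f <;> rfl

theorem pvGoB_fuel (f : Nat) : ∀ (g : Nat) (l : List (Int × Int)) (idx : Int),
    l.length ≤ f → l.length ≤ g → pvGoB f l idx = pvGoB g l idx := by
  induction f with
  | zero =>
    intro g l idx hf _
    have : l = [] := by cases l <;> simp_all
    subst this; simp [pvGoB_nil]
  | succ f ih =>
    intro g l idx hf hg
    match l with
    | [] => simp [pvGoB_nil]
    | x :: xs =>
      match g, hg with
      | g + 1, hg =>
        rw [pvGoB, pvGoB]
        have hlen : (List.drop (pvRunLen x xs) xs).length = xs.length - pvRunLen x xs := by simp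
        simp only [List.length_cons] at hf hg
        rw [ih g (xs.drop (pvRunLen x xs)) (idx + (pvRunLen x xs : Int) + 1) (by omega) (by omega)]

theorem pvGoB_chg : ∀ (l : List (Int × Int)) (x : Int × Int) (idx : Int) (f : Nat),
    l.length ≤ f →
    pvGoB (f + 1) (x :: l) idx = pvChg x l (idx + 1) ++ [idx + l.length] := by
  intro l
  induction l with
  | nil =>
    intro x idx f _
    simp [pvGoB, pvRunLen, pvGoB_nil, pvChg]
  | cons y ys ih =>
    intro x idx f hf
    simp only [List.length_cons] at hf
    match f, hf with
    | f + 1, _ =>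
      by_cases h : y = x
      · -- head equal to the previous value: the run extends
        obtain rfl := h
        have hr : pvRunLen y (y :: ys) = pvRunLen y ys + 1 := by simp [pvRunLen]
        rw [pvGoB]
        simp only [hr, List.drop_succ_cons]
        have ihy := ih y (idx + 1) f (by omega)
        rw [pvGoB] at ihy
        have hc1 : (idx + ((pvRunLen y ys + 1 : Nat) : Int)) = idx + 1 + (pvRunLen y ys : Int) := by
          push_cast; ring
        have hfuel : pvGoB (f + 1) (ys.drop (pvRunLen y ys)) (idx + 1 + (pvRunLen y ys : Int) + 1)
            = pvGoB f (ys.drop (pvRunLen y ys)) (idx + 1 + (pvRunLen y ys : Int) + 1) := by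
          have h1 : (ys.drop (pvRunLen y ys)).length = ys.length - pvRunLen y ys := by simp
          apply pvGoB_fuel <;> omega
        rw [hc1, hfuel, ihy]
        simp [pvChg]
        all_goals omega
      · -- head differs: a run of length 1 ends here
        have hr : pvRunLen x (y :: ys) = 0 := by simp [pvRunLen, h]
        rw [pvGoB]
        simp only [hr, List.drop_zero, Nat.cast_zero, add_zero]
        rw [ih y (idx + 1) f (by omega)]
        simp [pvChg, h]
        all_goals omega

-- A's enumerate/pyGetD fold appends exactly the change indices pvChg.
theorem pvA_fold_eq : ∀ (l : List (Int × Int)) (prev : Int × Int) (pre : List (Int × Int))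
    (k : Nat) (acc : List Int),
    (∀ (j : Nat), j < l.length →
      PySem.List.pyGetD pre ((k : Int) + (j : Int)) (0, 0) = (prev :: l).getD j (0, 0)) →
    (PySem.List.enumerate l (k : Int)).foldl
      (fun acc p => if p.2 ≠ PySem.List.pyGetD pre p.1 (0, 0) then acc ++ [p.1 - 1] else acc) acc
    = acc ++ pvChg prev l (k : Int) := by
  intro l
  induction l with
  | nil => intro prev pre k acc _; simp [pvChg, PySem.List.enumerate_nil]
  | cons x xs ih =>
    intro prev pre k acc hpre
    rw [PySem.List.enumerate_cons]
    simp only [List.foldl_cons]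
    have h0 := hpre 0 (by simp)
    simp only [Nat.cast_zero, add_zero, List.getD_cons_zero] at h0
    have hstep : ((k : Int) + 1) = ((k + 1 : Nat) : Int) := by push_cast; ring
    have hpre' : ∀ (j : Nat), j < xs.length →
        PySem.List.pyGetD pre (((k + 1 : Nat) : Int) + (j : Int)) (0, 0) = (x :: xs).getD j (0, 0) := by
      intro j hj
      have h1 := hpre (j + 1) (by simp; omega)
      rw [List.getD_cons_succ] at h1
      rw [show (((k + 1 : Nat) : Int) + (j : Int)) = ((k : Int) + ((j + 1 : Nat) : Int)) by push_cast; ring]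
      exact h1
    rw [hstep, ih x pre (k + 1) _ hpre']
    rw [h0, ← hstep]
    by_cases hx : x = prev
    · simp [pvChg, hx]
    · simp [pvChg, hx]

-- ===== VERDICT (by name: the statement is the Claim_ definition above) =====
theorem filter_adjacent_redundant_index_spec : Claim_equal_filter_adjacent_redundant_index := by
  intro coordinates _hdom hpre
  unfold Spec_filter_adjacent_redundant_index
  match coordinates, hpre with
  | c0 :: rest, _ =>
    unfold filter_adjacent_redundant_index filter_adjacent_redundant_index_alt
    simp only [List.length_cons]
    rw [pvGoB_chg rest c0 0 rest.length (le_refl _)]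
    rw [PySem.List.slice_to_neg_one]
    have hdl : [c0] ++ (c0 :: rest).dropLast = (c0 :: c0 :: rest).dropLast := rfl
    have hpre' : ∀ (j : Nat), j < (c0 :: rest).length →
        PySem.List.pyGetD ([c0] ++ (c0 :: rest).dropLast) (((0 : Nat) : Int) + (j : Int)) (0, 0)
          = (c0 :: c0 :: rest).getD j (0, 0) := by
      intro j hj
      simp only [List.length_cons] at hj
      rw [show (((0 : Nat) : Int) + (j : Int)) = ((j : Nat) : Int) by push_cast; ring]
      rw [PySem.List.pyGetD_natCast, hdl]
      have h1 : j < ((c0 :: c0 :: rest).dropLast).length := by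
        simp only [List.length_dropLast, List.length_cons]; omega
      have h2 : j < (c0 :: c0 :: rest).length := by
        simp only [List.length_cons]; omega
      rw [List.getD_eq_getElem _ _ h1, List.getD_eq_getElem _ _ h2, List.getElem_dropLast]
    have hfold := pvA_fold_eq (c0 :: rest) c0 ([c0] ++ (c0 :: rest).dropLast) 0 [] hpre'
    simp only [Nat.cast_zero] at hfold
    rw [hfold]
    simp [pvChg]
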